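-- pv_equiv track=rewrite | github.com/UW-Madison-Lee-Lab/ENTP | rasp/has_triplet.py | has_triplet_linear
-- ===== SOURCE A (Python) =====
-- def has_triplet_linear(x):
--     n = len(x)
--     mod_counts = [False] * 128
--     for i in range(n):
--         mod_counts[-x[i] % 128] = True
--
--     for i in range(n):
--         if mod_counts[(x[0] + x[i]) % 128]:
--             return 1
--
--     return 0
-- ===== SOURCE B (Python) =====
-- def has_triplet_linear(x):
--     if not x:
--         return 0
--     present = 0
--     for v in x:
--         present |= 1 << (v % 128)
--     t = (-x[0]) % 128
--     for r in range(128):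
--         if present >> r & 1 and present >> (t - r) % 128 & 1:
--             return 1
--     return 0
-- ===== Notes on version B (the rewrite author's own statement) =====
-- stated objective: alternative
-- what changed: B packs the present residues mod 128 into one integer bitmask and then iterates over the 128 residue classes, testing each r against its additive complement (t-r)%128 with t=(-x[0])%128, instead of A's second scan over the data against a table of negated residues.
import Mathlib
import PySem

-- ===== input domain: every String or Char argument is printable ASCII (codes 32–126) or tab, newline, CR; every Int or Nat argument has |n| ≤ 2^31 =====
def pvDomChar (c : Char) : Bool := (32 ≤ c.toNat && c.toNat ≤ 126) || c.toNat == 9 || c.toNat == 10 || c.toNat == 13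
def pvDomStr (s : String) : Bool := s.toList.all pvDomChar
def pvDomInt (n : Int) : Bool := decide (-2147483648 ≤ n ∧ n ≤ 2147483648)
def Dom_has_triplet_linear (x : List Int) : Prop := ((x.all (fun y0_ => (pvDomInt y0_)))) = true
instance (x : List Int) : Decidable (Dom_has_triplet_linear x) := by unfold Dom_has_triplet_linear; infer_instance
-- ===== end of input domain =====

-- B checks the 128 residue classes against one bitmask of present residues (pairing r with (t-r)%128, t = (-x[0])%128)
-- instead of A's two scans over the data with a negated-residue table: an alternative, constant-space second phase.


-- ===== PORT A =====
-- A's second loop with early return: 1 at the first table hit, else 0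
def htlScan (mc : Int → Bool) (x0 : Int) : List Int → Int
  | [] => 0
  | v :: rest => if mc (PySem.Int.mod (x0 + v) 128) then 1 else htlScan mc x0 rest

def has_triplet_linear (x : List Int) : Int :=
  -- mod_counts as a predicate updated in place; the for-loop over indices is a fold over the elements
  let mc := x.foldl (fun m v => fun j => if j = PySem.Int.mod (-v) 128 then true else m j)
                    (fun _ => false)
  match x with
  | [] => 0                       -- the second loop runs zero times
  | x0 :: _ => htlScan mc x0 x    -- x[0] is the same value at every iteration

-- ===== PORT B =====
-- B's second loop: over r in range(128); 'present >> r & 1' is Nat.testBit present r (r is nonnegative here,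
-- and present is a nonnegative Python int built from | and <<, ported exactly as a Nat bitmask)
def htlbScan (present : Nat) (t : Int) : List Int → Int
  | [] => 0
  | r :: rest =>
      if present.testBit r.toNat && present.testBit (PySem.Int.mod (t - r) 128).toNat
      then 1 else htlbScan present t rest

def has_triplet_linear_alt (x : List Int) : Int :=
  match x with
  | [] => 0                      -- if not x: return 0
  | x0 :: _ =>
    let present := x.foldl (fun p v => p ||| (1 <<< (PySem.Int.mod v 128).toNat)) 0
    let t := PySem.Int.mod (-x0) 128
    htlbScan present t (PySem.List.pyRange 0 128 1)

-- ===== PRECONDITION & SPEC =====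
def Spec_has_triplet_linear (x : List Int) (out : Int) : Prop := out = has_triplet_linear_alt x
instance (x : List Int) (out : Int) : Decidable (Spec_has_triplet_linear x out) := by unfold Spec_has_triplet_linear; infer_instance

-- ===== CLAIM (what is proved, stated in full; the proofs are below) =====
def Claim_equal_has_triplet_linear : Prop := ∀ (x : List Int), Dom_has_triplet_linear x → Spec_has_triplet_linear x (has_triplet_linear x)

-- ===== LEMMAS AND PROOFS =====

-- (1 << m) has exactly bit m set
theorem htl_testBit_one_shl (m k : Nat) : (1 <<< m).testBit k = (m == k) := by
  rcases eq_or_ne m k with h | h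
  · simp [h, Nat.testBit_shiftLeft]
  · simp only [Nat.testBit_shiftLeft, beq_eq_false_iff_ne.mpr h]
    rcases Nat.lt_or_ge k m with h2 | h2
    · simp [Nat.not_le.mpr h2]
    · simp only [h2, decide_true, Bool.true_and]
      have hk : k - m ≠ 0 := by omega
      cases hkm : k - m with
      | zero => exact absurd hkm hk
      | succ c => simp [Nat.testBit_succ]

-- the bitmask built by B's first loop holds bit k iff some element v of x has k = (v % 128)
theorem htl_mask_spec (x : List Int) (p : Nat) (k : Nat) :
    (x.foldl (fun p v => p ||| (1 <<< (PySem.Int.mod v 128).toNat)) p).testBit k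
      = (p.testBit k || x.any (fun v => (PySem.Int.mod v 128).toNat == k)) := by
  induction x generalizing p with
  | nil => simp
  | cons v rest ih =>
      rw [List.foldl_cons, ih, List.any_cons]
      rw [Nat.testBit_or, htl_testBit_one_shl]
      cases p.testBit k <;> cases hb : ((PySem.Int.mod v 128).toNat == k) <;> simp

-- the table built by A's first loop holds j iff some element u of x has j = (-u) % 128
theorem htl_mc_spec (x : List Int) (m : Int → Bool) (j : Int) :
    (x.foldl (fun m v => fun j => if j = PySem.Int.mod (-v) 128 then true else m j) m) j
      = (m j || x.any (fun u => j == PySem.Int.mod (-u) 128)) := by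
  induction x generalizing m with
  | nil => simp
  | cons v rest ih =>
      rw [List.foldl_cons, ih, List.any_cons]
      by_cases h : j = PySem.Int.mod (-v) 128
      · simp [h]
      · have hb : (j == PySem.Int.mod (-v) 128) = false := beq_eq_false_iff_ne.mpr h
        simp only [if_neg h, hb, Bool.false_or]

-- A's second loop returns 1 iff some element v of x satisfies the table test
theorem htl_scan_spec (mc : Int → Bool) (x0 : Int) (l : List Int) :
    htlScan mc x0 l = if l.any (fun v => mc (PySem.Int.mod (x0 + v) 128)) then 1 else 0 := by
  induction l with
  | nil => rfl
  | cons v rest ih =>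
      show (if mc (PySem.Int.mod (x0 + v) 128) then (1:Int) else htlScan mc x0 rest) = _
      rw [List.any_cons, ih]
      cases hb : mc (PySem.Int.mod (x0 + v) 128) <;> simp

-- B's second loop returns 1 iff some r in the list passes the double bit test
theorem htlb_scan_spec (present : Nat) (t : Int) (l : List Int) :
    htlbScan present t l
      = if l.any (fun r => present.testBit r.toNat
                            && present.testBit (PySem.Int.mod (t - r) 128).toNat)
        then 1 else 0 := by
  induction l with
  | nil => rfl
  | cons r rest ih =>
      show (if present.testBit r.toNat && present.testBit (PySem.Int.mod (t - r) 128).toNat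
            then (1:Int) else htlbScan present t rest) = _
      rw [List.any_cons, ih]
      cases hb : (present.testBit r.toNat && present.testBit (PySem.Int.mod (t - r) 128).toNat) <;> simp

-- ===== VERDICT (by name: the statement is the Claim_ definition above) =====
theorem has_triplet_linear_spec : Claim_equal_has_triplet_linear := by
  intro x _
  unfold Spec_has_triplet_linear
  cases x with
  | nil => rfl
  | cons x0 rest =>
      show htlScan
             ((x0 :: rest).foldl (fun m v => fun j => if j = PySem.Int.mod (-v) 128 then true else m j)
               (fun _ => false)) x0 (x0 :: rest)
           = htlbScan ((x0 :: rest).foldl (fun p v => p ||| (1 <<< (PySem.Int.mod v 128).toNat)) 0)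
               (PySem.Int.mod (-x0) 128) (PySem.List.pyRange 0 128 1)
      rw [htl_scan_spec, htlb_scan_spec]
      set xs := x0 :: rest with hxs
      have cond :
          (xs.any (fun v =>
              (xs.foldl (fun m v => fun j => if j = PySem.Int.mod (-v) 128 then true else m j)
                (fun _ => false)) (PySem.Int.mod (x0 + v) 128))) = true
          ↔ ((PySem.List.pyRange 0 128 1).any (fun r =>
              (xs.foldl (fun p v => p ||| (1 <<< (PySem.Int.mod v 128).toNat)) 0).testBit r.toNat
                && (xs.foldl (fun p v => p ||| (1 <<< (PySem.Int.mod v 128).toNat)) 0).testBit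
                     (PySem.Int.mod (PySem.Int.mod (-x0) 128 - r) 128).toNat)) = true := by
        constructor
        · intro h
          simp only [List.any_eq_true, htl_mc_spec, Bool.false_or, beq_iff_eq] at h
          obtain ⟨v, hv, u, hu, he⟩ := h
          simp only [List.any_eq_true, Bool.and_eq_true, htl_mask_spec, Nat.zero_testBit, Bool.false_or,
            beq_iff_eq]
          refine ⟨PySem.Int.mod v 128, ?_, ⟨v, hv, ?_⟩, ⟨u, hu, ?_⟩⟩
          · rw [PySem.List.mem_pyRange_one]
            exact ⟨PySem.Int.mod_nonneg v (by norm_num), PySem.Int.mod_lt v (by norm_num)⟩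
          · rfl
          · -- (u % 128) = ((-x0 % 128 - v % 128) % 128), from (x0+v) % 128 = (-u) % 128
            simp only [PySem.Int.mod_eq_emod_of_pos (by norm_num : (0:Int) < 128)] at he ⊢
            omega
        · intro h
          simp only [List.any_eq_true, Bool.and_eq_true, htl_mask_spec, Nat.zero_testBit, Bool.false_or,
            beq_iff_eq] at h
          obtain ⟨r, hr, ⟨v, hv, hev⟩, ⟨u, hu, heu⟩⟩ := h
          rw [PySem.List.mem_pyRange_one] at hr
          simp only [List.any_eq_true, htl_mc_spec, Bool.false_or, beq_iff_eq]
          refine ⟨v, hv, u, hu, ?_⟩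
          simp only [PySem.Int.mod_eq_emod_of_pos (by norm_num : (0:Int) < 128)] at hev heu ⊢
          omega
      by_cases h2 : (xs.any (fun v =>
          (xs.foldl (fun m v => fun j => if j = PySem.Int.mod (-v) 128 then true else m j)
            (fun _ => false)) (PySem.Int.mod (x0 + v) 128))) = true
      · rw [if_pos h2, if_pos (cond.mp h2)]
      · rw [if_neg h2, if_neg (fun hB => h2 (cond.mpr hB))]
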